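-- pv_equiv track=rewrite | github.com/Ross326/traffic-planning-uestc | projects/yan-zisong/src/main.py | flow_loading
-- ===== SOURCE A (Python) =====
-- def network_links(network):
--     links = []
--     for node, neighbors in network.items():
--         for neighbor in neighbors:
--             links.append((node, neighbor))
--     return links
--
-- def flow_loading(network, path, flow):
--     map = {}
--     links = set(zip(path[:-1], path[1:]))
--     for link in network_links(network):
--         if link in links:
--             map[link] = flow
--         else:
--             map[link] = 0
--     return map
-- ===== SOURCE B (Python) =====
-- def flow_loading(network, path, flow):
--     result = {(node, neighbor): 0 for node, neighbors in network.items() for neighbor in neighbors}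
--     for pair in zip(path, path[1:]):
--         if pair in result:
--             result[pair] = flow
--     return result
-- ===== Notes on version B (the rewrite author's own statement) =====
-- stated objective: alternative
-- what changed: Instead of classifying every network link against a precomputed set of path pairs (set built from zip(path[:-1], path[1:]), then per-link if/else), B first builds the whole result dict with all values 0 by a comprehension and then makes one pass over the path's consecutive pairs, overwriting the value of each pair that is a key of the dict with flow; the set and the per-link membership test disappear.
import Mathlib
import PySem

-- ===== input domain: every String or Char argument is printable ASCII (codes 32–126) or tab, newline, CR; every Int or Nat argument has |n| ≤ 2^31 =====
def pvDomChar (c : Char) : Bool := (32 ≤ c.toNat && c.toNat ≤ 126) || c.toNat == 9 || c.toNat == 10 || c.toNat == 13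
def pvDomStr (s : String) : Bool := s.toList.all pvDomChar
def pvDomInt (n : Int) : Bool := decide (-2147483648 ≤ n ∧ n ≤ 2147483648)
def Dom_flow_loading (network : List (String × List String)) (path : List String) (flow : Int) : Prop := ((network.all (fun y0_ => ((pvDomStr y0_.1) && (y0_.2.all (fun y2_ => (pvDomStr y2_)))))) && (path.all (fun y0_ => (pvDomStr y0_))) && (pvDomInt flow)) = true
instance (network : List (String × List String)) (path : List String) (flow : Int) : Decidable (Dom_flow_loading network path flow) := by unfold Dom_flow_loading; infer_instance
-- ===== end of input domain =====

-- B replaces A's precomputed path-pair set and per-link if/else by a zero-initialised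
-- dict followed by one overwrite pass over the path's consecutive pairs (alternative decomposition, same cost).

-- ===== PORT A =====
def network_links_port (network : List (String × List String)) : List (String × String) :=
  network.foldl (fun links p => p.2.foldl (fun links neighbor => links ++ [(p.1, neighbor)]) links) []

def flow_loading (network : List (String × List String)) (path : List String) (flow : Int) : List (String × String × Int) :=
  let links : PySem.Set (String × String) :=
    PySem.Set.ofList (List.zip (PySem.List.slice path none (some (-1))) (PySem.List.slice path (some 1) none))
  let m : PySem.Dict (String × String) Int :=
    (network_links_port network).foldl
      (fun m link => if PySem.Set.contains links link then m.insert link flow else m.insert link 0)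
      PySem.Dict.empty
  m.items.map (fun p => (p.1.1, p.1.2, p.2))

-- ===== PORT B =====
def flow_loading_alt (network : List (String × List String)) (path : List String) (flow : Int) : List (String × String × Int) :=
  let result : PySem.Dict (String × String) Int :=
    network.foldl (fun d p => p.2.foldl (fun d neighbor => d.insert (p.1, neighbor) (0 : Int)) d)
      PySem.Dict.empty
  let result :=
    (List.zip path (PySem.List.slice path (some 1) none)).foldl
      (fun d pair => if d.contains pair then d.insert pair flow else d) result
  result.items.map (fun p => (p.1.1, p.1.2, p.2))

-- ===== PRECONDITION & SPEC =====
def Spec_flow_loading (network : List (String × List String)) (path : List String) (flow : Int) (out : List (String × String × Int)) : Prop := out = flow_loading_alt network path flow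
instance (network : List (String × List String)) (path : List String) (flow : Int) (out : List (String × String × Int)) : Decidable (Spec_flow_loading network path flow out) := by unfold Spec_flow_loading; infer_instance

-- ===== CLAIM (what is proved, stated in full; the proofs are below) =====
def Claim_equal_flow_loading : Prop := ∀ (network : List (String × List String)) (path : List String) (flow : Int), Dom_flow_loading network path flow → Spec_flow_loading network path flow (flow_loading network path flow)

-- ===== LEMMAS AND PROOFS =====

theorem zip_dropLast_tail {α : Type} : ∀ (l : List α), List.zip l.dropLast l.tail = List.zip l l.tail := by
  intro l
  induction l with
  | nil => rfl
  | cons a t ih =>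
    cases t with
    | nil => rfl
    | cons b t' =>
      simp only [List.dropLast_cons₂, List.tail_cons, List.zip_cons_cons] at ih ⊢
      rw [ih]

theorem network_links_eq {α β : Type} : ∀ (l : List (α × List β)) (acc : List (α × β)),
    l.foldl (fun links p => p.2.foldl (fun links b => links ++ [(p.1, b)]) links) acc
      = acc ++ l.flatMap (fun p => p.2.map (fun b => (p.1, b))) := by
  intro l
  induction l with
  | nil => simp
  | cons p t ih =>
    intro acc
    have inner : ∀ (bs : List β) (a : α) (acc : List (α × β)),
        bs.foldl (fun links b => links ++ [(a, b)]) acc = acc ++ bs.map (fun b => (a, b)) := by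
      intro bs a
      induction bs with
      | nil => simp
      | cons b bt ihb => intro acc; simp [List.foldl_cons, ihb]
    simp only [inner] at ih
    simp only [List.foldl_cons, inner, ih, List.flatMap_cons, List.append_assoc]

theorem dict_build_eq {α β : Type} [BEq (α × β)] : ∀ (l : List (α × List β)) (d : PySem.Dict (α × β) Int),
    l.foldl (fun d p => p.2.foldl (fun d b => d.insert (p.1, b) (0 : Int)) d) d
      = (l.flatMap (fun p => p.2.map (fun b => (p.1, b)))).foldl (fun d k => d.insert k 0) d := by
  intro l
  induction l with
  | nil => intro d; rfl
  | cons p t ih =>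
    intro d
    simp only [List.foldl_cons, List.flatMap_cons, List.foldl_append, ih, List.foldl_map]

theorem items_build {κ : Type} [DecidableEq κ] [BEq κ] [LawfulBEq κ] (f : κ → Int) :
    ∀ (L : List κ),
      ((L.foldl (fun d k => d.insert k (f k)) (PySem.Dict.empty : PySem.Dict κ Int)).items)
        = (PySem.Set.ofList L).map (fun k => (k, f k)) := by
  intro L
  induction L using List.reverseRecOn with
  | nil => rfl
  | append_singleton L x ih =>
    rw [List.foldl_append, List.foldl_cons, List.foldl_nil]
    rw [PySem.Set.ofList_append, PySem.Set.update_cons, PySem.Set.update_nil]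
    have hkeys : (L.foldl (fun d k => d.insert k (f k)) (PySem.Dict.empty : PySem.Dict κ Int)).keys
        = PySem.Set.ofList L := by
      simp only [PySem.Dict.keys, ih, List.map_map]
      rw [show ((fun (p : κ × Int) => p.1) ∘ fun k => (k, f k)) = id from rfl, List.map_id]
    by_cases hx : x ∈ PySem.Set.ofList L
    · have hc : (L.foldl (fun d k => d.insert k (f k)) (PySem.Dict.empty : PySem.Dict κ Int)).contains x = true := by
        rw [PySem.Dict.contains_iff_mem_keys, hkeys]; exact hx
      rw [PySem.Dict.items_insert_of_contains _ _ hc, ih, List.map_map]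
      rw [PySem.Set.add_of_mem hx]
      apply List.map_congr_left
      intro k hk
      simp only [Function.comp]
      by_cases h : k = x
      · subst h; simp
      · simp [h]
    · have hc : (L.foldl (fun d k => d.insert k (f k)) (PySem.Dict.empty : PySem.Dict κ Int)).contains x = false := by
        rw [Bool.eq_false_iff]
        intro h
        rw [PySem.Dict.contains_iff_mem_keys, hkeys] at h
        exact hx h
      rw [PySem.Dict.items_insert_of_not_contains _ _ hc, ih]
      rw [PySem.Set.add_of_not_mem hx]
      simp

theorem pass_items {κ : Type} [DecidableEq κ] [BEq κ] [LawfulBEq κ] (flow : Int) :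
    ∀ (P : List κ) (d : PySem.Dict κ Int), d.keys.Nodup →
      ((P.foldl (fun d pr => if d.contains pr then d.insert pr flow else d) d).items)
        = d.items.map (fun p => if p.1 ∈ P then (p.1, flow) else p) := by
  intro P
  induction P with
  | nil =>
    intro d _
    simp
  | cons x P ih =>
    intro d hnd
    rw [List.foldl_cons]
    by_cases hc : d.contains x = true
    · rw [if_pos hc]
      have hnd' : (d.insert x flow).keys.Nodup := PySem.Dict.nodup_keys_insert d x flow hnd
      rw [ih _ hnd', PySem.Dict.items_insert_of_contains _ _ hc, List.map_map]
      apply List.map_congr_left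
      intro p _
      by_cases hpx : p.1 = x
      · simp [Function.comp, hpx]
      · simp [Function.comp, hpx, beq_iff_eq]
    · rw [if_neg hc]
      rw [ih _ hnd]
      apply List.map_congr_left
      intro p hp
      have hpx : p.1 ≠ x := by
        intro h
        apply hc
        rw [PySem.Dict.contains_iff_mem_keys]
        have := PySem.Dict.mem_keys_of_mem_items _ hp
        rwa [h] at this
      simp [hpx]

-- ===== VERDICT (by name: the statement is the Claim_ definition above) =====
theorem flow_loading_spec : Claim_equal_flow_loading := by
  intro network path flow _
  unfold Spec_flow_loading flow_loading flow_loading_alt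
  simp only []
  congr 1
  -- both dicts have the same items list
  set L := network.flatMap (fun p => p.2.map (fun b => (p.1, b))) with hL
  have hlinks : network_links_port network = L := by
    unfold network_links_port
    rw [network_links_eq, List.nil_append]
  have hpairs : List.zip (PySem.List.slice path none (some (-1))) (PySem.List.slice path (some 1) none)
      = List.zip path (PySem.List.slice path (some 1) none) := by
    rw [PySem.List.slice_to_neg_one, PySem.List.slice_from_one, zip_dropLast_tail]
  set P := List.zip path (PySem.List.slice path (some 1) none) with hP
  have hbody : (fun (m : PySem.Dict (String × String) Int) link =>
        if PySem.Set.contains (PySem.Set.ofList P) link then m.insert link flow else m.insert link 0)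
      = fun m link => m.insert link (if PySem.Set.contains (PySem.Set.ofList P) link then flow else 0) := by
    funext m link
    by_cases h : link ∈ P <;> simp [h]
  rw [hpairs, hlinks, hbody, items_build]
  rw [dict_build_eq]
  have h0 := items_build (κ := String × String) (fun _ => (0 : Int)) L
  have hnd : ((L.foldl (fun d k => d.insert k ((fun _ => (0:Int)) k)) (PySem.Dict.empty : PySem.Dict (String × String) Int)).keys).Nodup := by
    simp only [PySem.Dict.keys, h0, List.map_map]
    rw [show ((fun (p : (String × String) × Int) => p.1) ∘ fun k => (k, (0:Int))) = id from rfl, List.map_id]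
    exact PySem.Set.nodup_ofList L
  rw [pass_items flow P _ hnd, h0, List.map_map]
  apply List.map_congr_left
  intro k _
  by_cases hk : k ∈ P <;> simp [Function.comp, hk]
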